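-- pv_equiv track=rewrite | github.com/krushaybhavsar/amp-cs | 5-you-will-all-conform/conform.py | please_flip_original
-- ===== SOURCE A (Python) =====
-- def please_flip_original(caps: list[str]) -> list[str]:
--     """
--     Generates a minimal list of shouts needed to have all fan caps face the same direction.
--
--     Args:
--       caps: list of strings which are either 'F' (Forward) or 'B' (Backward)
--
--     Return:
--       a list of shouts, which could be empty if the list of caps is either empty or all the same direction
--     """
--     intervals = []
--     interval_start = 0
--     forward_count = backward_count = 0
--     shouts = []
--
--     if len(caps) == 0:
--         return shouts
--
--     # Step 1: Determine intervals where hats face the same direction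
--     for i in range(1, len(caps)):
--         if caps[interval_start] != caps[i]:
--             intervals.append(
--                 (interval_start, i - 1, caps[interval_start])
--             )  # (start, end, direction)
--
--             if caps[interval_start] == "F":
--                 forward_count += 1
--             else:
--                 backward_count += 1
--             interval_start = i  # new hat direction->new interval start
--
--     intervals.append((interval_start, len(caps) - 1, caps[interval_start]))
--     if caps[interval_start] == "F":
--         forward_count += 1
--     else:
--         backward_count += 1
--
--     # Step 2: Decide which way to flip based on hat direction with least number of intervals
--     if forward_count < backward_count:
--         flip_direction = "F"
--     else:
--         flip_direction = "B"
--
--     # Step 3: Flip all of the intervals that match with the flip direction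
--     for t in intervals:
--         if t[2] == flip_direction:
--             if t[0] == t[1]:
--                 shouts.append(f"Person in position {str(t[0])} flip your cap!")
--             else:
--                 shouts.append(
--                     f"People in positions {str(t[0])} through {str(t[1])} flip your caps!"
--                 )
--     return shouts
-- ===== SOURCE B (Python) =====
-- def _shout(start, end):
--     if start == end:
--         return f"Person in position {str(start)} flip your cap!"
--     return f"People in positions {str(start)} through {str(end)} flip your caps!"
--
--
-- def please_flip_original(caps: list[str]) -> list[str]:
--     if not caps:
--         return []
--
--     # Pass 1: count runs per direction without storing intervals.
--     forward_count = backward_count = 0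
--     prev = None
--     for c in caps:
--         if c != prev:
--             if c == "F":
--                 forward_count += 1
--             else:
--                 backward_count += 1
--             prev = c
--
--     flip_direction = "F" if forward_count < backward_count else "B"
--
--     # Pass 2: emit shouts directly as runs of the chosen direction end.
--     shouts = []
--     start = 0
--     cur = caps[0]
--     for i, c in enumerate(caps):
--         if c != cur:
--             if cur == flip_direction:
--                 shouts.append(_shout(start, i - 1))
--             start, cur = i, c
--     if cur == flip_direction:
--         shouts.append(_shout(start, len(caps) - 1))
--     return shouts
-- ===== Notes on version B (the rewrite author's own statement) =====
-- stated objective: alternative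
-- what changed: Instead of materialising a list of (start, end, direction) interval tuples and then filtering it, B counts runs in one tuple-free pass (direction-change counter with a prev sentinel) and then emits the shouts directly in a second enumerate pass as each run of the chosen direction ends.
import Mathlib
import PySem

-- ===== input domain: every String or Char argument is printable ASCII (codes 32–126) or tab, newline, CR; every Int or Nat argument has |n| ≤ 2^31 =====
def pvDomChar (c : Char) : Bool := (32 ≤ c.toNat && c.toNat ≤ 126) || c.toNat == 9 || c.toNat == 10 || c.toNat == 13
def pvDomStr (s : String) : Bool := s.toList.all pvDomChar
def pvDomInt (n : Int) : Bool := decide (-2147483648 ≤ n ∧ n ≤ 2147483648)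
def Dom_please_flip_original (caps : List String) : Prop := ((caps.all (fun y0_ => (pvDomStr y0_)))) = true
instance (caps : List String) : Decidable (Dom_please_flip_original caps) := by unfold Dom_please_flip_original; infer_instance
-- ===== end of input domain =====

-- B is a different decomposition of the same task: it counts runs in one pass without
-- materialising an interval list, then emits the shouts directly in a second pass.

-- ===== PORT A =====
-- step of A's interval-building loop: state (intervals, interval_start, forward_count, backward_count)
def pvStepA1 (caps : List String) (st : List (Int × Int × String) × Int × Int × Int) (i : Int) :
    List (Int × Int × String) × Int × Int × Int :=
  if PySem.List.pyGetD caps st.2.1 "" != PySem.List.pyGetD caps i "" then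
    (st.1 ++ [(st.2.1, i - 1, PySem.List.pyGetD caps st.2.1 "")],
     i,
     (if PySem.List.pyGetD caps st.2.1 "" == "F" then st.2.2.1 + 1 else st.2.2.1),
     (if PySem.List.pyGetD caps st.2.1 "" == "F" then st.2.2.2 else st.2.2.2 + 1))
  else st

-- step of A's Step-3 loop over the interval list
def pvStepA3 (flip : String) (shouts : List String) (t : Int × Int × String) : List String :=
  if t.2.2 == flip then
    shouts ++ [if t.1 == t.2.1 then
        "Person in position " ++ PySem.Int.toStr t.1 ++ " flip your cap!"
      else
        "People in positions " ++ PySem.Int.toStr t.1 ++ " through " ++ PySem.Int.toStr t.2.1 ++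
          " flip your caps!"]
  else shouts

def please_flip_original (caps : List String) : List String :=
  if caps.length = 0 then [] else
    let st := (PySem.List.pyRange 1 (caps.length : Int)).foldl (pvStepA1 caps) ([], 0, 0, 0)
    let intervals := st.1 ++ [(st.2.1, (caps.length : Int) - 1, PySem.List.pyGetD caps st.2.1 "")]
    let forward := if PySem.List.pyGetD caps st.2.1 "" == "F" then st.2.2.1 + 1 else st.2.2.1
    let backward := if PySem.List.pyGetD caps st.2.1 "" == "F" then st.2.2.2 else st.2.2.2 + 1
    let flip := if forward < backward then "F" else "B"
    intervals.foldl (pvStepA3 flip) []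

-- ===== PORT B =====
-- Source B's _shout helper
def pvShout (s e : Int) : String :=
  if s == e then "Person in position " ++ PySem.Int.toStr s ++ " flip your cap!"
  else "People in positions " ++ PySem.Int.toStr s ++ " through " ++ PySem.Int.toStr e ++
    " flip your caps!"

-- step of B's run-counting pass: state (forward_count, backward_count, prev)
def pvStepB1 (st : Int × Int × Option String) (c : String) : Int × Int × Option String :=
  if some c != st.2.2 then
    (if c == "F" then (st.1 + 1, st.2.1, some c) else (st.1, st.2.1 + 1, some c))
  else st

-- step of B's shout-emitting pass over enumerate(caps): state (shouts, start, cur)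
def pvStepB2 (flip : String) (st : List String × Int × String) (p : Int × String) :
    List String × Int × String :=
  if p.2 != st.2.2 then
    ((if st.2.2 == flip then st.1 ++ [pvShout st.2.1 (p.1 - 1)] else st.1), p.1, p.2)
  else st

def please_flip_original_alt (caps : List String) : List String :=
  if caps = [] then [] else
    let cnt := caps.foldl pvStepB1 (0, 0, none)
    let flip := if cnt.1 < cnt.2.1 then "F" else "B"
    let st := (PySem.List.enumerate caps 0).foldl (pvStepB2 flip)
      ([], 0, PySem.List.pyGetD caps 0 "")
    if st.2.2 == flip then st.1 ++ [pvShout st.2.1 ((caps.length : Int) - 1)] else st.1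

-- ===== PRECONDITION & SPEC =====
def Spec_please_flip_original (caps : List String) (out : List String) : Prop := out = please_flip_original_alt caps
instance (caps : List String) (out : List String) : Decidable (Spec_please_flip_original caps out) := by unfold Spec_please_flip_original; infer_instance

-- ===== CLAIM (what is proved, stated in full; the proofs are below) =====
def Claim_equal_please_flip_original : Prop := ∀ (caps : List String), Dom_please_flip_original caps → Spec_please_flip_original caps (please_flip_original caps)

-- ===== LEMMAS AND PROOFS =====

-- A's interval step re-expressed over (index, element) pairs, as enumerate delivers them
def pvStepA1' (caps : List String) (st : List (Int × Int × String) × Int × Int × Int)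
    (p : Int × String) : List (Int × Int × String) × Int × Int × Int :=
  if PySem.List.pyGetD caps st.2.1 "" != p.2 then
    (st.1 ++ [(st.2.1, p.1 - 1, PySem.List.pyGetD caps st.2.1 "")],
     p.1,
     (if PySem.List.pyGetD caps st.2.1 "" == "F" then st.2.2.1 + 1 else st.2.2.1),
     (if PySem.List.pyGetD caps st.2.1 "" == "F" then st.2.2.2 else st.2.2.2 + 1))
  else st

def pvChF (c : String) : Int := if c == "F" then 1 else 0
def pvChB (c : String) : Int := if c == "F" then 0 else 1

-- the shouts A's Step 3 produces from an interval list
def pvSel (flip : String) (ivs : List (Int × Int × String)) : List String :=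
  (ivs.filter (fun t => t.2.2 == flip)).map (fun t => pvShout t.1 t.2.1)

lemma pvFoldlA3 (flip : String) (l : List (Int × Int × String)) (init : List String) :
    l.foldl (pvStepA3 flip) init = init ++ pvSel flip l := by
  have h : pvStepA3 flip = fun acc (t : Int × Int × String) =>
      if (fun (t : Int × Int × String) => t.2.2 == flip) t = true then
        acc ++ [(fun (t : Int × Int × String) => pvShout t.1 t.2.1) t] else acc := rfl
  rw [h, PySem.List.foldl_append_if]; rfl

lemma pvSel_append (flip : String) (l : List (Int × Int × String)) (t : Int × Int × String) :
    pvSel flip (l ++ [t]) = pvSel flip l ++ (if t.2.2 == flip then [pvShout t.1 t.2.1] else []) := by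
  by_cases h : t.2.2 == flip <;> simp [pvSel, h]

-- A's pyRange-indexed loop is the same fold presented over enumerate of the tail
lemma pvFoldA_enum (c0 : String) (rest : List String)
    (init : List (Int × Int × String) × Int × Int × Int) :
    (PySem.List.pyRange 1 ((c0 :: rest).length : Int)).foldl (pvStepA1 (c0 :: rest)) init
      = (PySem.List.enumerate rest 1).foldl (pvStepA1' (c0 :: rest)) init := by
  have hn : (0 : Int) < ((c0 :: rest).length : Int) := by
    simp only [List.length_cons]; push_cast; omega
  have h2 := PySem.List.enumerate_eq_map_pyRange (c0 :: rest) ""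
  rw [PySem.List.enumerate_cons, show PySem.List.len (c0 :: rest) = ((c0 :: rest).length : Int) from by simp,
      PySem.List.pyRange_one_cons hn, List.map_cons] at h2
  have h3 : (PySem.List.pyRange (0 + 1) ((c0 :: rest).length : Int)).map
      (fun j => (j, PySem.List.pyGetD (c0 :: rest) j "")) = PySem.List.enumerate rest (0 + 1) :=
    (List.cons.injEq _ _ _ _).mp h2.symm |>.2
  have h4 : PySem.List.enumerate rest 1
      = (PySem.List.pyRange 1 ((c0 :: rest).length : Int)).map
          (fun j => (j, PySem.List.pyGetD (c0 :: rest) j "")) := by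
    rw [show (1 : Int) = 0 + 1 from by ring]; exact h3.symm
  rw [h4, List.foldl_map]
  rfl

-- B's count state after having counted the current run equals A's counts adjusted by the
-- current run, and B's shout state tracks A's intervals filtered by the flip direction.
lemma pvMaster (caps : List String) (flip : String) :
    ∀ (rest : List String) (j : Int) (ivs : List (Int × Int × String)) (s f b : Int)
      (cur : String),
    PySem.List.pyGetD caps s "" = cur →
    (∀ k : Nat, k < rest.length → PySem.List.pyGetD caps (j + (k : Int)) "" = rest.getD k "") →
    (rest.foldl pvStepB1 (f + pvChF cur, b + pvChB cur, some cur) =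
       (((PySem.List.enumerate rest j).foldl (pvStepA1' caps) (ivs, s, f, b)).2.2.1 +
          pvChF (PySem.List.pyGetD caps
            ((PySem.List.enumerate rest j).foldl (pvStepA1' caps) (ivs, s, f, b)).2.1 ""),
        ((PySem.List.enumerate rest j).foldl (pvStepA1' caps) (ivs, s, f, b)).2.2.2 +
          pvChB (PySem.List.pyGetD caps
            ((PySem.List.enumerate rest j).foldl (pvStepA1' caps) (ivs, s, f, b)).2.1 ""),
        some (PySem.List.pyGetD caps
          ((PySem.List.enumerate rest j).foldl (pvStepA1' caps) (ivs, s, f, b)).2.1 "")))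
    ∧ (∀ sh : List String,
       (PySem.List.enumerate rest j).foldl (pvStepB2 flip) (sh ++ pvSel flip ivs, s, cur) =
         (sh ++ pvSel flip ((PySem.List.enumerate rest j).foldl (pvStepA1' caps) (ivs, s, f, b)).1,
          ((PySem.List.enumerate rest j).foldl (pvStepA1' caps) (ivs, s, f, b)).2.1,
          PySem.List.pyGetD caps
            ((PySem.List.enumerate rest j).foldl (pvStepA1' caps) (ivs, s, f, b)).2.1 "")) := by
  intro rest
  induction rest with
  | nil =>
    intro j ivs s f b cur hs hidx
    simp [PySem.List.enumerate, hs]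
  | cons c rest ih =>
    intro j ivs s f b cur hs hidx
    have hc : PySem.List.pyGetD caps j "" = c := by
      have := hidx 0 (by simp)
      simpa using this
    have hidx' : ∀ k : Nat, k < rest.length →
        PySem.List.pyGetD caps ((j + 1) + (k : Int)) "" = rest.getD k "" := by
      intro k hk
      have := hidx (k + 1) (by simpa using Nat.succ_lt_succ hk)
      have harith : j + ((k + 1 : Nat) : Int) = (j + 1) + (k : Int) := by push_cast; ring
      rw [harith] at this
      simpa using this
    rw [PySem.List.enumerate_cons]
    by_cases hcc : cur == c
    · -- same run continues: all three steps are no-ops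
      have hcur : cur = c := eq_of_beq hcc
      have hA : pvStepA1' caps (ivs, s, f, b) (j, c) = (ivs, s, f, b) := by
        simp [pvStepA1', hs, hcur]
      have hB1 : pvStepB1 (f + pvChF cur, b + pvChB cur, some cur) c
          = (f + pvChF cur, b + pvChB cur, some cur) := by
        simp [pvStepB1, hcur]
      constructor
      · have := (ih (j + 1) ivs s f b cur hs hidx').1
        simpa [List.foldl_cons, hA, hB1] using this
      · intro sh
        have hB2 : pvStepB2 flip (sh ++ pvSel flip ivs, s, cur) (j, c)
            = (sh ++ pvSel flip ivs, s, cur) := by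
          simp [pvStepB2, hcur.symm]
        have := (ih (j + 1) ivs s f b cur hs hidx').2 sh
        simpa [List.foldl_cons, hA, hB2] using this
    · -- run boundary at index j
      have hne : ¬ cur = c := fun h => hcc (by simp [h])
      have hA : pvStepA1' caps (ivs, s, f, b) (j, c)
          = (ivs ++ [(s, j - 1, cur)], j, f + pvChF cur, b + pvChB cur) := by
        by_cases hF : cur == "F" <;>
          simp [pvStepA1', hs, hne, pvChF, pvChB, hF]
      have hB1 : pvStepB1 (f + pvChF cur, b + pvChB cur, some cur) c
          = ((f + pvChF cur) + pvChF c, (b + pvChB cur) + pvChB c, some c) := by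
        by_cases hF : c == "F" <;>
          simp [pvStepB1, Ne.symm hne, pvChF, pvChB, hF]
      constructor
      · have := (ih (j + 1) (ivs ++ [(s, j - 1, cur)]) j (f + pvChF cur) (b + pvChB cur) c
          hc hidx').1
        simpa [List.foldl_cons, hA, hB1] using this
      · intro sh
        have hB2 : pvStepB2 flip (sh ++ pvSel flip ivs, s, cur) (j, c)
            = (sh ++ pvSel flip (ivs ++ [(s, j - 1, cur)]), j, c) := by
          rw [pvSel_append]
          by_cases hFl : cur == flip <;> simp [pvStepB2, Ne.symm hne, hFl]
        have := (ih (j + 1) (ivs ++ [(s, j - 1, cur)]) j (f + pvChF cur) (b + pvChB cur) c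
          hc hidx').2 sh
        simpa [List.foldl_cons, hA, hB2] using this

-- ===== VERDICT (by name: the statement is the Claim_ definition above) =====
theorem please_flip_original_spec : Claim_equal_please_flip_original := by
  intro caps _
  unfold Spec_please_flip_original
  cases caps with
  | nil => rfl
  | cons c0 rest =>
    have hs0 : PySem.List.pyGetD (c0 :: rest) 0 "" = c0 := PySem.List.pyGetD_zero_cons c0 rest ""
    have hidx : ∀ k : Nat, k < rest.length →
        PySem.List.pyGetD (c0 :: rest) ((1 : Int) + (k : Int)) "" = rest.getD k "" := by
      intro k hk
      have harith : (1 : Int) + (k : Int) = ((k + 1 : Nat) : Int) := by push_cast; ring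
      rw [harith, PySem.List.pyGetD_natCast]
      simp
    -- counts: B's first pass head step
    have hHd : pvStepB1 (0, 0, none) c0 = (0 + pvChF c0, 0 + pvChB c0, some c0) := by
      by_cases hF : c0 == "F" <;> simp [pvStepB1, pvChF, pvChB, hF]
    simp only [please_flip_original, please_flip_original_alt]
    rw [pvFoldA_enum c0 rest ([], 0, 0, 0)]
    set stA := (PySem.List.enumerate rest 1).foldl (pvStepA1' (c0 :: rest)) ([], 0, 0, 0) with hstA
    set curA := PySem.List.pyGetD (c0 :: rest) stA.2.1 "" with hcurA
    -- the flip direction is the same on both sides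
    have hflip : ∀ flip : String,
        (PySem.List.enumerate rest 1).foldl (pvStepB2 flip) ([], 0, c0)
          = (pvSel flip stA.1, stA.2.1, curA) := by
      intro flip
      have := (pvMaster (c0 :: rest) flip rest 1 [] 0 0 0 c0 hs0 hidx).2 []
      simpa [pvSel] using this
    have hcnt := (pvMaster (c0 :: rest) "?" rest 1 [] 0 0 0 c0 hs0 hidx).1
    have hcnt' : (c0 :: rest).foldl pvStepB1 (0, 0, none)
        = (stA.2.2.1 + pvChF curA, stA.2.2.2 + pvChB curA, some curA) := by
      rw [List.foldl_cons, hHd]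
      exact hcnt
    have hfw : (if curA == "F" then stA.2.2.1 + 1 else stA.2.2.1) = stA.2.2.1 + pvChF curA := by
      by_cases hF : curA == "F" <;> simp [pvChF, hF]
    have hbw : (if curA == "F" then stA.2.2.2 else stA.2.2.2 + 1) = stA.2.2.2 + pvChB curA := by
      by_cases hF : curA == "F" <;> simp [pvChB, hF]
    simp only [List.length_cons, if_neg (by omega : ¬ (rest.length + 1 = 0)),
      if_neg (by simp : ¬ (c0 :: rest = [])), hcnt', hfw, hbw]
    rw [PySem.List.enumerate_cons]
    have hB2hd : pvStepB2 (if stA.2.2.1 + pvChF curA < stA.2.2.2 + pvChB curA then "F" else "B")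
        ([], 0, PySem.List.pyGetD (c0 :: rest) 0 "") ((0 : Int), c0)
        = ([], 0, c0) := by
      simp [pvStepB2, hs0]
    rw [List.foldl_cons, hB2hd]
    simp only [show ((0 : Int) + 1) = 1 from by norm_num]
    rw [hflip]
    rw [pvFoldlA3, pvSel_append]
    by_cases hFl : curA == (if stA.2.2.1 + pvChF curA < stA.2.2.2 + pvChB curA then "F" else "B") <;>
      simp [hFl]
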